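-- pv_equiv track=rewrite | github.com/Chewboctopus/ml-sharp-pinokio | app/app.py | get_smart_resolution_choices
-- ===== SOURCE A (Python) =====
-- def get_smart_resolution_choices(img_w, img_h):
--     """
--     Generates a list of resolution options including 960p and 640p.
--     Sorts 'Original' by actual size and adds High Resources warnings.
--     """
--     short_edge = min(img_w, img_h) if (img_w > 0 and img_h > 0) else 0
--
--     # Define standard presets (Label, ShortEdgeSize)
--     presets = [
--         ("4K (2160p)", 2160),
--         ("QHD (1440p)", 1440),
--         ("FHD (1080p)", 1080),
--         ("960p", 960),
--         ("HD (720p)", 720),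
--         ("640p", 640),
--         ("SD (480p)", 480)
--     ]
--
--     # Create the "Original" entry with its real size for sorting
--     if short_edge > 0:
--         orig_label = f"Original ({short_edge}p)"
--         presets.append((orig_label, short_edge))
--     else:
--         presets.append(("Original", 9999))
--
--     # Sort by size descending
--     presets.sort(key=lambda x: x[1], reverse=True)
--
--     final_choices = []
--     default_value = None
--
--     for label, size in presets:
--         display_str = label
--         if size > 1088:
--             display_str += " ⚠️ (High Resources)"
--         final_choices.append(display_str)
--
--         # Smart default selection logic: Prefer FHD (1080p)
--         if "1080p" in label and default_value is None:
--             default_value = display_str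
--
--     if default_value is None and final_choices:
--         default_value = final_choices[0]
--
--     return final_choices, default_value
-- ===== SOURCE B (Python) =====
-- def get_smart_resolution_choices(img_w, img_h):
--     """Insert 'Original' into the already-descending presets in order (after
--     equal sizes), then build the display list by comprehension and pick the
--     default with next()."""
--     short_edge = min(img_w, img_h) if (img_w > 0 and img_h > 0) else 0
--     presets = [
--         ("4K (2160p)", 2160),
--         ("QHD (1440p)", 1440),
--         ("FHD (1080p)", 1080),
--         ("960p", 960),
--         ("HD (720p)", 720),
--         ("640p", 640),
--         ("SD (480p)", 480),
--     ]
--     orig = (f"Original ({short_edge}p)", short_edge) if short_edge > 0 else ("Original", 9999)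
--     i = 0
--     while i < len(presets) and presets[i][1] >= orig[1]:
--         i += 1
--     presets.insert(i, orig)
--
--     final_choices = [label + " ⚠️ (High Resources)" if size > 1088 else label
--                      for label, size in presets]
--     default_value = next(
--         (display for (label, _), display in zip(presets, final_choices) if "1080p" in label),
--         final_choices[0] if final_choices else None)
--     return final_choices, default_value
-- ===== Notes on version B (the rewrite author's own statement) =====
-- stated objective: simpler
-- what changed: Replaces append + stable reverse sort + one accumulating loop (choices + default) by an ordered insertion of the Original entry into the already-descending preset list, a comprehension for the display strings, and a next() first-match for the default.
import Mathlib
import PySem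

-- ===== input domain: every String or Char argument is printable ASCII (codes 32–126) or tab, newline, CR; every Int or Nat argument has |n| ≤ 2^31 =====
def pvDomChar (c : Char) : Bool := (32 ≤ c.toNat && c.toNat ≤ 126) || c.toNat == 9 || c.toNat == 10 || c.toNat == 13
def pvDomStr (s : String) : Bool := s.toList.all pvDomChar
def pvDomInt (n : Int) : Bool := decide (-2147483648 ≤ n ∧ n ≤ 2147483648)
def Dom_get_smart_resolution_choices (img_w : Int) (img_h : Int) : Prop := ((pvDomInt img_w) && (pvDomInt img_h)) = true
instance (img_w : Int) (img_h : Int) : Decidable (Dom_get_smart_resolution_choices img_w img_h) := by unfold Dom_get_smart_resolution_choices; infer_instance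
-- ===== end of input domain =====

-- B replaces A's append-then-stable-reverse-sort-then-accumulating-loop by an ordered
-- insertion into the already-descending presets, a map for the display strings and a
-- first-match search for the default (objective: simpler decomposition, same cost).

-- ===== PORT A =====
def get_smart_resolution_choices (img_w : Int) (img_h : Int) : List String × String :=
  let short_edge : Int := if img_w > 0 ∧ img_h > 0 then min img_w img_h else 0
  let presets0 : List (String × Int) :=
    [("4K (2160p)", 2160), ("QHD (1440p)", 1440), ("FHD (1080p)", 1080),
     ("960p", 960), ("HD (720p)", 720), ("640p", 640), ("SD (480p)", 480)]
  let presets1 : List (String × Int) :=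
    if short_edge > 0 then
      presets0 ++ [("Original (" ++ PySem.Int.toStr short_edge ++ "p)", short_edge)]
    else
      presets0 ++ [("Original", 9999)]
  let presets2 := PySem.List.sorted presets1 (fun x => x.2) true
  let res := presets2.foldl
    (fun (acc : List String × Option String) ls =>
      let display := if ls.2 > 1088 then ls.1 ++ " ⚠️ (High Resources)" else ls.1
      (acc.1 ++ [display],
       if PySem.Str.isIn "1080p" ls.1 = true ∧ acc.2 = none then some display else acc.2))
    ([], none)
  -- presets2 always has 8 entries, so final_choices is never empty and Python's
  -- 'default_value = None' result is unreachable; the "" covers only that dead branch.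
  (res.1, match res.2 with | some d => d | none => res.1.headD "")

-- ===== PORT B =====
-- skip the (descending) prefix with size >= x's size, insert x there (B's while+insert)
def pvInsertDesc (x : String × Int) : List (String × Int) → List (String × Int)
  | [] => [x]
  | y :: ys => if y.2 ≥ x.2 then y :: pvInsertDesc x ys else x :: y :: ys

def get_smart_resolution_choices_alt (img_w : Int) (img_h : Int) : List String × String :=
  let short_edge : Int := if img_w > 0 ∧ img_h > 0 then min img_w img_h else 0
  let presets0 : List (String × Int) :=
    [("4K (2160p)", 2160), ("QHD (1440p)", 1440), ("FHD (1080p)", 1080),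
     ("960p", 960), ("HD (720p)", 720), ("640p", 640), ("SD (480p)", 480)]
  let orig : String × Int :=
    if short_edge > 0 then ("Original (" ++ PySem.Int.toStr short_edge ++ "p)", short_edge)
    else ("Original", 9999)
  let presets := pvInsertDesc orig presets0
  let final_choices := presets.map
    (fun ls => if ls.2 > 1088 then ls.1 ++ " ⚠️ (High Resources)" else ls.1)
  let default_value :=
    match (presets.zip final_choices).find? (fun pd => PySem.Str.isIn "1080p" pd.1.1) with
    | some pd => pd.2
    -- final_choices is never empty; the "" covers only B's dead 'None' fallback
    | none => match final_choices with | [] => "" | c :: _ => c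
  (final_choices, default_value)

-- ===== PRECONDITION & SPEC =====
def Spec_get_smart_resolution_choices (img_w : Int) (img_h : Int) (out : List String × String) : Prop := out = get_smart_resolution_choices_alt img_w img_h
instance (img_w : Int) (img_h : Int) (out : List String × String) : Decidable (Spec_get_smart_resolution_choices img_w img_h out) := by unfold Spec_get_smart_resolution_choices; infer_instance

-- ===== CLAIM (what is proved, stated in full; the proofs are below) =====
def Claim_equal_get_smart_resolution_choices : Prop := ∀ (img_w : Int) (img_h : Int), Dom_get_smart_resolution_choices img_w img_h → Spec_get_smart_resolution_choices img_w img_h (get_smart_resolution_choices img_w img_h)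

-- ===== LEMMAS AND PROOFS =====

-- insertion by the reverse-sort comparison = B's ordered insertion
theorem pv_insertBy_eq (x : String × Int) (ys : List (String × Int)) :
    PySem.List.insertBy (fun a b : String × Int => decide (b.2 < a.2)) x ys = pvInsertDesc x ys := by
  induction ys with
  | nil => rfl
  | cons y ys ih =>
    simp only [PySem.List.insertBy, pvInsertDesc]
    by_cases h : y.2 < x.2
    · simp [h, not_le.mpr h]
    · simp [h, not_lt.mp h, ih]

-- Python's stable reverse sort of the descending presets plus one appended element
-- is exactly B's ordered insertion (after equal sizes).
theorem pv_sort_eq (x : String × Int) :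
    PySem.List.sorted
      ([("4K (2160p)", (2160:Int)), ("QHD (1440p)", 1440), ("FHD (1080p)", 1080),
        ("960p", 960), ("HD (720p)", 720), ("640p", 640), ("SD (480p)", 480)] ++ [x])
      (fun p => p.2) true
    = pvInsertDesc x
        [("4K (2160p)", 2160), ("QHD (1440p)", 1440), ("FHD (1080p)", 1080),
         ("960p", 960), ("HD (720p)", 720), ("640p", 640), ("SD (480p)", 480)] := by
  rw [PySem.List.sorted_rev_eq_foldl_insertBy, List.foldl_append]
  exact pv_insertBy_eq x _

-- A's accumulating loop = map for the choices plus first-match search for the default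
theorem pv_fold_eq (ps : List (String × Int)) (acc : List String) (dv : Option String) :
    ps.foldl
      (fun (acc : List String × Option String) ls =>
        let display := if ls.2 > 1088 then ls.1 ++ " ⚠️ (High Resources)" else ls.1
        (acc.1 ++ [display],
         if PySem.Str.isIn "1080p" ls.1 = true ∧ acc.2 = none then some display else acc.2))
      (acc, dv)
    = (acc ++ ps.map (fun ls => if ls.2 > 1088 then ls.1 ++ " ⚠️ (High Resources)" else ls.1),
       match dv with
       | some d => some d
       | none =>
         ((ps.zip (ps.map (fun ls => if ls.2 > 1088 then ls.1 ++ " ⚠️ (High Resources)" else ls.1))).find?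
            (fun pd => PySem.Str.isIn "1080p" pd.1.1)).map (fun pd => pd.2)) := by
  induction ps generalizing acc dv with
  | nil => cases dv <;> simp
  | cons p ps ih =>
    simp only [List.foldl_cons, List.map_cons, List.zip_cons_cons, List.find?_cons]
    rw [ih]
    cases dv with
    | some d => simp
    | none =>
      cases h : PySem.Chars.isIn ['1', '0', '8', '0', 'p'] p.1.toList <;> simp [h]

-- ===== VERDICT (by name: the statement is the Claim_ definition above) =====
theorem get_smart_resolution_choices_spec : Claim_equal_get_smart_resolution_choices := by
  intro img_w img_h _
  unfold Spec_get_smart_resolution_choices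
  simp only [get_smart_resolution_choices, get_smart_resolution_choices_alt]
  set s : Int := if img_w > 0 ∧ img_h > 0 then min img_w img_h else 0 with hs
  have hpre :
      (if s > 0 then
        ([("4K (2160p)", (2160:Int)), ("QHD (1440p)", 1440), ("FHD (1080p)", 1080),
          ("960p", 960), ("HD (720p)", 720), ("640p", 640), ("SD (480p)", 480)]
           ++ [("Original (" ++ PySem.Int.toStr s ++ "p)", s)])
       else
        ([("4K (2160p)", 2160), ("QHD (1440p)", 1440), ("FHD (1080p)", 1080),
          ("960p", 960), ("HD (720p)", 720), ("640p", 640), ("SD (480p)", 480)]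
           ++ [("Original", 9999)]))
      = [("4K (2160p)", (2160:Int)), ("QHD (1440p)", 1440), ("FHD (1080p)", 1080),
         ("960p", 960), ("HD (720p)", 720), ("640p", 640), ("SD (480p)", 480)]
          ++ [if s > 0 then ("Original (" ++ PySem.Int.toStr s ++ "p)", s) else ("Original", 9999)] := by
    split <;> rfl
  rw [hpre, pv_sort_eq, pv_fold_eq]
  set orig : String × Int :=
    if s > 0 then ("Original (" ++ PySem.Int.toStr s ++ "p)", s) else ("Original", 9999) with horig
  set ins := pvInsertDesc orig
    [("4K (2160p)", (2160:Int)), ("QHD (1440p)", 1440), ("FHD (1080p)", 1080),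
     ("960p", 960), ("HD (720p)", 720), ("640p", 640), ("SD (480p)", 480)] with hins
  cases hfind :
      (ins.zip (ins.map (fun ls => if ls.2 > 1088 then ls.1 ++ " ⚠️ (High Resources)" else ls.1))).find?
        (fun pd => PySem.Str.isIn "1080p" pd.1.1) with
  | some pd => simp
  | none =>
    simp only [Option.map_none]
    cases h : ins.map (fun ls => if ls.2 > 1088 then ls.1 ++ " ⚠️ (High Resources)" else ls.1) with
    | nil => simp
    | cons c cs => simp [List.headD]
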